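-- pv_equiv track=rewrite | github.com/Sepirence/CS372-Project | abbv_matching.py | matching_1
-- ===== SOURCE A (Python) =====
-- def matching_1(abbv_title_match_dict: dict):
--     '''
--     모든 글자가 순서에 맞게 들어갔다.
--     '''
--     for key, values in abbv_title_match_dict.items():
--         if len(values) == 1:
--             continue
--
--         abbv_list = list(key)
--         remove_set = set()
--         for title in values:
--             target_abbv = abbv_list[:]
--             target_title = title[:]
--
--             while len(target_abbv) > 0:
--                 char = target_abbv.pop(0)
--                 index = target_title.find(char)
--                 if index == -1:
--                     break
--                 target_title = target_title[index+1:]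
--             else:
--                 continue
--             remove_set.add(title)
--         abbv_title_match_dict[key] -= remove_set
--     return abbv_title_match_dict
-- ===== SOURCE B (Python) =====
-- def matching_1(abbv_title_match_dict: dict):
--     for key, values in abbv_title_match_dict.items():
--         if len(values) == 1:
--             continue
--         kept = set()
--         for title in values:
--             it = iter(title)
--             if all(c in it for c in key):
--                 kept.add(title)
--         abbv_title_match_dict[key] = kept
--     return abbv_title_match_dict
-- ===== Notes on version B (the rewrite author's own statement) =====
-- stated objective: alternative
-- what changed: Replaces A's per-title pop(0)/str.find/slice-copy loop and the remove_set-then-subtract pass with a single-pass iterator (two-pointer) subsequence check that directly collects the kept titles.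
import Mathlib
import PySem

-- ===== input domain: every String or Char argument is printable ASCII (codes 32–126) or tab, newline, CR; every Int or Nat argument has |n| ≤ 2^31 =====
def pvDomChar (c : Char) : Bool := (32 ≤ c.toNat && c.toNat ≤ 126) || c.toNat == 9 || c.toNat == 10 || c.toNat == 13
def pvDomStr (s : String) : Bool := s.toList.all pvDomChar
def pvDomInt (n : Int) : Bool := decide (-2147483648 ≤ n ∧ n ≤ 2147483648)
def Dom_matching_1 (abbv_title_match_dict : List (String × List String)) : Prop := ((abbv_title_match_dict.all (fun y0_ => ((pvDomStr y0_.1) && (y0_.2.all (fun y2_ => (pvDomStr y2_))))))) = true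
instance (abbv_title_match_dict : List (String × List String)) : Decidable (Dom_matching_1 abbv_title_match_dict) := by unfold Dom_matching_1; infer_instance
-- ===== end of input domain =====

-- B replaces A's pop/find/slice subsequence test by a single-pass iterator/two-pointer scan (objective: alternative).
-- Both programs mutate the dict's values in place; the equivalence proved here is about the returned dict.

-- ===== PORT A =====
-- A's inner while-loop: pop the next abbreviation char, str.find it in the remaining title,
-- break (→ remove, result true) on -1, else continue on the suffix after the match.
def pvACheck : List Char → List Char → Bool
  | [], _ => false
  | c :: rest, title =>
    match title.findIdx? (· == c) with
    | none => true
    | some i => pvACheck rest (title.drop (i + 1))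

def matching_1 (abbv_title_match_dict : List (String × List String)) : List (String × List String) :=
  (PySem.Dict.ofList abbv_title_match_dict).items.map (fun kv =>
    if kv.2.length == 1 then kv
    else
      let removeSet := kv.2.foldl (fun s title =>
        if pvACheck kv.1.toList title.toList then PySem.Set.add s title else s) PySem.Set.empty
      (kv.1, PySem.Set.diff kv.2 removeSet))

-- ===== PORT B =====
-- B's 'it = iter(title); all(c in it for c in key)': consume the title up to each abbreviation char.
def pvIsSub : List Char → List Char → Bool
  | [], _ => true
  | _ :: _, [] => false
  | c :: cs, t :: ts => if t == c then pvIsSub cs ts else pvIsSub (c :: cs) ts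

def matching_1_alt (abbv_title_match_dict : List (String × List String)) : List (String × List String) :=
  (PySem.Dict.ofList abbv_title_match_dict).items.map (fun kv =>
    if kv.2.length == 1 then kv
    else (kv.1, kv.2.filter (fun title => pvIsSub kv.1.toList title.toList)))

-- ===== PRECONDITION & SPEC =====
def Spec_matching_1 (abbv_title_match_dict : List (String × List String)) (out : List (String × List String)) : Prop := out = matching_1_alt abbv_title_match_dict
instance (abbv_title_match_dict : List (String × List String)) (out : List (String × List String)) : Decidable (Spec_matching_1 abbv_title_match_dict out) := by unfold Spec_matching_1; infer_instance

-- ===== CLAIM (what is proved, stated in full; the proofs are below) =====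
def Claim_equal_matching_1 : Prop := ∀ (abbv_title_match_dict : List (String × List String)), Dom_matching_1 abbv_title_match_dict → Spec_matching_1 abbv_title_match_dict (matching_1 abbv_title_match_dict)

-- ===== LEMMAS AND PROOFS =====

lemma pvIsSub_of_findIdx?_none (c : Char) (cs ts : List Char)
    (h : ts.findIdx? (· == c) = none) : pvIsSub (c :: cs) ts = false := by
  induction ts with
  | nil => rfl
  | cons t ts ih =>
    rw [List.findIdx?_cons] at h
    by_cases htc : t == c
    · simp [htc] at h
    · simp only [htc, Bool.false_eq_true, if_false] at h
      have := Option.map_eq_none_iff.mp h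
      simp [pvIsSub, htc, ih this]

lemma pvIsSub_of_findIdx?_some (c : Char) (cs ts : List Char) (i : Nat)
    (h : ts.findIdx? (· == c) = some i) :
    pvIsSub (c :: cs) ts = pvIsSub cs (ts.drop (i + 1)) := by
  induction ts generalizing i with
  | nil => simp at h
  | cons t ts ih =>
    rw [List.findIdx?_cons] at h
    by_cases htc : t == c
    · simp only [htc, if_true] at h
      cases h
      simp [pvIsSub, htc]
    · simp only [htc, Bool.false_eq_true, if_false] at h
      obtain ⟨j, hj, rfl⟩ := Option.map_eq_some_iff.mp h
      simp [pvIsSub, htc, ih j hj]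

lemma pvACheck_eq_not_pvIsSub (ab ts : List Char) : pvACheck ab ts = !pvIsSub ab ts := by
  induction ab generalizing ts with
  | nil => simp [pvACheck, pvIsSub]
  | cons c cs ih =>
    cases hf : ts.findIdx? (· == c) with
    | none => simp [pvACheck, hf, pvIsSub_of_findIdx?_none c cs ts hf]
    | some i => simp [pvACheck, hf, ih, pvIsSub_of_findIdx?_some c cs ts i hf]

lemma mem_foldl_filterAdd (p : String → Bool) (l : List String) (s : PySem.Set String) (y : String) :
    y ∈ l.foldl (fun s t => if p t then PySem.Set.add s t else s) s ↔ y ∈ s ∨ (y ∈ l ∧ p y = true) := by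
  induction l generalizing s with
  | nil => simp
  | cons t l ih =>
    simp only [List.foldl_cons, ih, List.mem_cons]
    by_cases hp : p t
    · rw [if_pos hp, PySem.Set.mem_add]
      constructor
      · rintro (⟨h | rfl⟩ | h)
        · exact Or.inl h
        · exact Or.inr ⟨Or.inl rfl, hp⟩
        · exact Or.inr ⟨Or.inr h.1, h.2⟩
      · rintro (h | ⟨rfl | h, hy⟩)
        · exact Or.inl (Or.inl h)
        · exact Or.inl (Or.inr rfl)
        · exact Or.inr ⟨h, hy⟩
    · rw [if_neg hp]
      constructor
      · rintro (h | h)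
        · exact Or.inl h
        · exact Or.inr ⟨Or.inr h.1, h.2⟩
      · rintro (h | ⟨rfl | h, hy⟩)
        · exact Or.inl h
        · exact absurd hy hp
        · exact Or.inr ⟨h, hy⟩

lemma entry_eq (key : String) (values : List String) :
    PySem.Set.diff values
      (values.foldl (fun s title =>
        if pvACheck key.toList title.toList then PySem.Set.add s title else s) PySem.Set.empty)
    = values.filter (fun title => pvIsSub key.toList title.toList) := by
  unfold PySem.Set.diff
  apply List.filter_congr
  intro x hx
  have hmem := mem_foldl_filterAdd (fun t => pvACheck key.toList t.toList) values PySem.Set.empty x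
  rw [pvACheck_eq_not_pvIsSub key.toList x.toList] at hmem
  have hempty : x ∉ PySem.Set.empty := by simp [PySem.Set.empty]
  cases hs : pvIsSub key.toList x.toList with
  | false =>
    simp only [hs, Bool.not_false, and_true] at hmem
    have hin : x ∈ values.foldl (fun s title =>
        if pvACheck key.toList title.toList then PySem.Set.add s title else s) PySem.Set.empty :=
      hmem.mpr (Or.inr hx)
    simpa [List.contains_eq_mem] using hin
  | true =>
    simp only [hs, Bool.not_true, Bool.false_eq_true, and_false, or_false] at hmem
    have hout : x ∉ values.foldl (fun s title =>
        if pvACheck key.toList title.toList then PySem.Set.add s title else s) PySem.Set.empty :=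
      fun h => hempty (hmem.mp h)
    simpa [List.contains_eq_mem] using hout

-- ===== VERDICT (by name: the statement is the Claim_ definition above) =====
theorem matching_1_spec : Claim_equal_matching_1 := by
  intro xs _
  unfold Spec_matching_1 matching_1 matching_1_alt
  apply List.map_congr_left
  intro kv _
  by_cases h : kv.2.length == 1
  · simp [h]
  · simp only [h, Bool.false_eq_true, if_false]
    exact congrArg (Prod.mk kv.1) (entry_eq kv.1 kv.2)
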